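-- pv_equiv track=rewrite | github.com/diksha12p/DSA_Practice_Problems | TwoSUm_less_than_K.py | sum_less_than_k
-- ===== SOURCE A (Python) =====
-- def sum_less_than_k(nums : list, k : int) -> tuple:
--     nums.sort()
--     curr_max = 0
--     p, x, y = 0, 0, 0
--
--     for i in range(len(nums)):
--         if nums[i] >= k:
--             p = i
--             break
--
--     for i in range(p):
--         for j in range(i+1,p):
--             if curr_max < nums[i] + nums[j] < k:
--                 curr_max = nums[i] + nums[j]
--                 x, y = nums[i], nums[j]
--
--     return x, y
-- ===== SOURCE B (Python) =====
-- def sum_less_than_k(nums: list, k: int) -> tuple: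
--     a = sorted(nums)
--     # only elements smaller than k can participate (as in A); when none reaches k
--     # this is the whole list (A accidentally drops everything in that case)
--     p = sum(v < k for v in a)
--     best, x, y = 0, 0, 0
--     i, j = 0, p - 1
--     while i < j:
--         s = a[i] + a[j]
--         if s < k:
--             if s > best:
--                 best, x, y = s, a[i], a[j]
--             i += 1
--         else:
--             j -= 1
--     return x, y
-- ===== Notes on version B (the rewrite author's own statement) =====
-- stated objective: faster
-- what changed: Replaces A's linear break-scan for the first element >= k and O(n^2) nested pair loops by a count of elements below k plus a two-pointer sweep over the sorted list; B also fixes A's leftover-loop-state bug where p stays 0 when no element reaches k.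
-- intended difference: When every element is smaller than k and some pair has sum strictly between 0 and k, A's scan for the first element >= k never fires so p keeps its initial value 0, the pair loops run over nothing and A returns (0,0); B returns the maximum-sum such pair, which is the intended value. — e.g. on sum_less_than_k([1, 2], 4): A returns [0, 0], B returns [1, 2]
import Mathlib
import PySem

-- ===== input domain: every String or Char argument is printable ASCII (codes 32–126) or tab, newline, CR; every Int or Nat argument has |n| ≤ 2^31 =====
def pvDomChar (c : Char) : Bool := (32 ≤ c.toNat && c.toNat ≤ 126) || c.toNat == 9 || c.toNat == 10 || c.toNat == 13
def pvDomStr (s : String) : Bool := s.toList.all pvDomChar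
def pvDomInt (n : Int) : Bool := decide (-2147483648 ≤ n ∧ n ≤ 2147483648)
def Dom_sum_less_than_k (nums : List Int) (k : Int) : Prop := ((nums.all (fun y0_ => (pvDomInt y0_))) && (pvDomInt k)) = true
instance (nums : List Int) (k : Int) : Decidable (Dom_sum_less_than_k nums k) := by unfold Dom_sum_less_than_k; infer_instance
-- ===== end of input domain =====

-- B replaces A's linear break-scan and O(n^2) nested pair loops by a count of the elements below k
-- plus a two-pointer sweep over the sorted list, and fixes A's leftover-state corner where p stays 0
-- (see D_ below). A sorts nums in place (B does not mutate); the equivalence is about the return value.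

-- ===== PORT A =====
-- 'for i in range(len(nums)): if nums[i] >= k: p = i; break' with p initialised to 0;
-- rem counts the remaining iterations (rem = len - i), so this is the same scan made structural.
-- All indices produced by the loops are in range, so List.getD is exact for nums[i].
def pvFindP (a : List Int) (k : Int) : Nat → Nat → Nat
  | 0, _ => 0
  | rem + 1, i => if k ≤ a.getD i 0 then i else pvFindP a k rem (i + 1)

def sum_less_than_k (nums : List Int) (k : Int) : List Int :=
  let a := PySem.List.sorted nums (fun x => x) false
  let p := pvFindP a k a.length 0
  let st := (List.range p).foldl (fun st i =>
      (List.Ico (i + 1) p).foldl (fun st j =>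
        if st.1 < a.getD i 0 + a.getD j 0 ∧ a.getD i 0 + a.getD j 0 < k then
          (a.getD i 0 + a.getD j 0, a.getD i 0, a.getD j 0)
        else st) st) ((0 : Int), (0 : Int), (0 : Int))
  [st.2.1, st.2.2]

-- ===== PORT B =====
-- 'while i < j: s = a[i]+a[j]; if s < k: (record if s > best); i += 1 else: j -= 1'
-- (s inlined); fuel bounds the iteration count (the window shrinks by one each step).
def pvTwoPtr (a : List Int) (k : Int) : Nat → Int → Int → (Int × Int × Int) → (Int × Int × Int)
  | 0, _, _, st => st
  | fuel + 1, i, j, st =>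
    if i < j then
      if PySem.List.pyGetD a i 0 + PySem.List.pyGetD a j 0 < k then
        pvTwoPtr a k fuel (i + 1) j
          (if st.1 < PySem.List.pyGetD a i 0 + PySem.List.pyGetD a j 0 then
            (PySem.List.pyGetD a i 0 + PySem.List.pyGetD a j 0,
             PySem.List.pyGetD a i 0, PySem.List.pyGetD a j 0)
           else st)
      else pvTwoPtr a k fuel i (j - 1) st
    else st

def sum_less_than_k_alt (nums : List Int) (k : Int) : List Int :=
  let a := PySem.List.sorted nums (fun x => x) false
  let p := a.foldl (fun c v => if v < k then c + 1 else c) (0 : Int)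
  let st := pvTwoPtr a k (a.length + 1) 0 (p - 1) ((0 : Int), (0 : Int), (0 : Int))
  [st.2.1, st.2.2]

-- ===== PRECONDITION & SPEC =====
-- When every element is smaller than k and some pair of elements (distinct positions) has sum
-- strictly between 0 and k, A's scan for the first element >= k never fires, p keeps its initial
-- value 0, the pair loops run over nothing and A returns (0,0); B returns the maximum-sum such
-- pair, which is the intended value.
def D_sum_less_than_k (nums : List Int) (k : Int) : Prop :=
  (∀ x ∈ nums, x < k) ∧ ∃ x ∈ nums, ∃ y ∈ nums.erase x, 0 < x + y ∧ x + y < k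
instance (nums : List Int) (k : Int) : Decidable (D_sum_less_than_k nums k) := by
  unfold D_sum_less_than_k; infer_instance

def Spec_sum_less_than_k (nums : List Int) (k : Int) (out : List Int) : Prop :=
  ¬ D_sum_less_than_k nums k → out = sum_less_than_k_alt nums k
instance (nums : List Int) (k : Int) (out : List Int) : Decidable (Spec_sum_less_than_k nums k out) := by
  unfold Spec_sum_less_than_k; infer_instance

def pvDiffWitness_sum_less_than_k : List Int × Int := ([1, 2], 4)
def pvDiffWitnessOut_sum_less_than_k : (List Int) × (List Int) := ([0, 0], [1, 2])

-- ===== CLAIM (what is proved, stated in full; the proofs are below) =====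
def Claim_unchanged_sum_less_than_k : Prop := ∀ (nums : List Int) (k : Int), Dom_sum_less_than_k nums k → Spec_sum_less_than_k nums k (sum_less_than_k nums k)
def Claim_changed_sum_less_than_k : Prop := Dom_sum_less_than_k (pvDiffWitness_sum_less_than_k.1) (pvDiffWitness_sum_less_than_k.2) ∧ D_sum_less_than_k (pvDiffWitness_sum_less_than_k.1) (pvDiffWitness_sum_less_than_k.2) ∧ sum_less_than_k (pvDiffWitness_sum_less_than_k.1) (pvDiffWitness_sum_less_than_k.2) = pvDiffWitnessOut_sum_less_than_k.1 ∧ sum_less_than_k_alt (pvDiffWitness_sum_less_than_k.1) (pvDiffWitness_sum_less_than_k.2) = pvDiffWitnessOut_sum_less_than_k.2 ∧ pvDiffWitnessOut_sum_less_than_k.1 ≠ pvDiffWitnessOut_sum_less_than_k.2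
def Claim_exact_sum_less_than_k : Prop := ∀ (nums : List Int) (k : Int), Dom_sum_less_than_k nums k → D_sum_less_than_k nums k → sum_less_than_k nums k ≠ sum_less_than_k_alt nums k

-- ===== LEMMAS AND PROOFS =====

-- the common loop body: try pair (i, j) against the running best
def pvUpd (a : List Int) (k : Int) (st : Int × Int × Int) (q : Nat × Nat) : Int × Int × Int :=
  if st.1 < a.getD q.1 0 + a.getD q.2 0 ∧ a.getD q.1 0 + a.getD q.2 0 < k then
    (a.getD q.1 0 + a.getD q.2 0, a.getD q.1 0, a.getD q.2 0)
  else st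

theorem pvUpd_absorb (a : List Int) (k : Int) (st : Int × Int × Int) (lo t hi : Nat)
    (h1 : a.getD t 0 ≤ a.getD hi 0) (hk : a.getD lo 0 + a.getD hi 0 < k) :
    pvUpd a k (pvUpd a k st (lo, t)) (lo, hi) = pvUpd a k st (lo, hi) := by
  have ht : a.getD lo 0 + a.getD t 0 < k := by omega
  by_cases h2 : st.1 < a.getD lo 0 + a.getD t 0
  · have e1 : pvUpd a k st (lo, t) = (a.getD lo 0 + a.getD t 0, a.getD lo 0, a.getD t 0) := by
      simp only [pvUpd]; rw [if_pos ⟨h2, ht⟩]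
    rw [e1]
    by_cases h3 : a.getD lo 0 + a.getD t 0 < a.getD lo 0 + a.getD hi 0
    · have e2 : pvUpd a k (a.getD lo 0 + a.getD t 0, a.getD lo 0, a.getD t 0) (lo, hi)
          = (a.getD lo 0 + a.getD hi 0, a.getD lo 0, a.getD hi 0) := by
        simp only [pvUpd]; rw [if_pos ⟨h3, hk⟩]
      have e3 : pvUpd a k st (lo, hi) = (a.getD lo 0 + a.getD hi 0, a.getD lo 0, a.getD hi 0) := by
        simp only [pvUpd]; rw [if_pos ⟨by omega, hk⟩]
      rw [e2, e3]
    · have heq : a.getD t 0 = a.getD hi 0 := by omega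
      have e2 : pvUpd a k (a.getD lo 0 + a.getD t 0, a.getD lo 0, a.getD t 0) (lo, hi)
          = (a.getD lo 0 + a.getD t 0, a.getD lo 0, a.getD t 0) := by
        simp only [pvUpd]; rw [if_neg (by omega)]
      have e3 : pvUpd a k st (lo, hi) = (a.getD lo 0 + a.getD hi 0, a.getD lo 0, a.getD hi 0) := by
        simp only [pvUpd]; rw [if_pos ⟨by omega, hk⟩]
      rw [e2, e3, heq]
  · have e1 : pvUpd a k st (lo, t) = st := by
      simp only [pvUpd]; rw [if_neg (by omega)]
    rw [e1]

theorem pvFold_best_mono (a : List Int) (k : Int) :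
    ∀ (L : List (Nat × Nat)) (st : Int × Int × Int), st.1 ≤ (L.foldl (pvUpd a k) st).1 := by
  intro L
  induction L with
  | nil => intro st; simp
  | cons q L ih =>
    intro st
    refine le_trans ?_ (ih (pvUpd a k st q))
    unfold pvUpd; split_ifs with h
    · exact le_of_lt h.1
    · exact le_refl _

theorem pvFold_dead (a : List Int) (k : Int) :
    ∀ (L : List (Nat × Nat)) (st : Int × Int × Int), 0 ≤ st.1 →
      (∀ q ∈ L, a.getD q.1 0 + a.getD q.2 0 ≤ 0 ∨ k ≤ a.getD q.1 0 + a.getD q.2 0) →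
      L.foldl (pvUpd a k) st = st := by
  intro L
  induction L with
  | nil => intro st _ _; rfl
  | cons q L ih =>
    intro st hst hall
    have hq := hall q (by simp)
    have : pvUpd a k st q = st := by
      unfold pvUpd; split_ifs with h
      · exfalso; omega
      · rfl
    simp only [List.foldl_cons, this]
    exact ih st hst (fun r hr => hall r (by simp [hr]))

theorem pvFold_sum_eq (a : List Int) (k : Int) :
    ∀ (L : List (Nat × Nat)) (st : Int × Int × Int), st.2.1 + st.2.2 = st.1 →
      (L.foldl (pvUpd a k) st).2.1 + (L.foldl (pvUpd a k) st).2.2 = (L.foldl (pvUpd a k) st).1 := by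
  intro L
  induction L with
  | nil => intro st h; simpa using h
  | cons q L ih =>
    intro st h
    simp only [List.foldl_cons]
    refine ih _ ?_
    unfold pvUpd; split_ifs with hc
    · rfl
    · exact h

theorem pvFold_pos (a : List Int) (k : Int) :
    ∀ (L : List (Nat × Nat)) (st : Int × Int × Int) (q : Nat × Nat), q ∈ L → 0 ≤ st.1 →
      0 < a.getD q.1 0 + a.getD q.2 0 → a.getD q.1 0 + a.getD q.2 0 < k →
      0 < (L.foldl (pvUpd a k) st).1 := by
  intro L
  induction L with
  | nil => intro st q hq; simp at hq
  | cons r L ih =>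
    intro st q hq hst hpos hlt
    simp only [List.foldl_cons]
    rcases List.mem_cons.mp hq with rfl | hq
    · have : 0 < (pvUpd a k st q).1 := by
        unfold pvUpd; split_ifs with h
        · exact hpos
        · omega
      calc 0 < (pvUpd a k st q).1 := this
        _ ≤ _ := pvFold_best_mono a k L _
    · refine ih _ q hq ?_ hpos hlt
      calc (0:Int) ≤ st.1 := hst
        _ ≤ _ := by
            unfold pvUpd; split_ifs with h
            · exact le_of_lt h.1
            · exact le_refl _

def pvPairs (lo hi : Nat) : List (Nat × Nat) :=
  (List.Ico lo hi).flatMap fun i => (List.Ico (i + 1) (hi + 1)).map fun j => (i, j)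

theorem pvPairs_cons (lo hi : Nat) (h : lo < hi) :
    pvPairs lo hi = ((List.Ico (lo + 1) (hi + 1)).map fun j => (lo, j)) ++ pvPairs (lo + 1) hi := by
  rw [pvPairs, pvPairs, List.Ico.eq_cons h, List.flatMap_cons]

theorem pvRow (a : List Int) (k : Int)
    (hs : ∀ p q : Nat, p ≤ q → q < a.length → a.getD p 0 ≤ a.getD q 0)
    (lo hi : Nat) (hhi : hi < a.length) (hk : a.getD lo 0 + a.getD hi 0 < k) :
    ∀ t st, lo < t → t ≤ hi →
      ((List.Ico t (hi + 1)).map fun j => (lo, j)).foldl (pvUpd a k) st = pvUpd a k st (lo, hi) := by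
  intro t st h1 h2
  induction h : hi - t generalizing t st with
  | zero =>
    have ht : t = hi := by omega
    subst ht
    rw [List.Ico.eq_cons (by omega), List.Ico.eq_nil_of_le (le_refl _)]
    simp [List.foldl]
  | succ n ih =>
    have hth : t < hi := by omega
    rw [List.Ico.eq_cons (by omega), List.map_cons, List.foldl_cons]
    rw [ih (t + 1) (pvUpd a k st (lo, t)) (by omega) (by omega) (by omega)]
    exact pvUpd_absorb a k st lo t hi (hs t hi (le_of_lt hth) hhi) hk

theorem pvUpd_dead (a : List Int) (k : Int) (st : Int × Int × Int) (q : Nat × Nat)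
    (h : a.getD q.1 0 + a.getD q.2 0 ≤ st.1 ∨ k ≤ a.getD q.1 0 + a.getD q.2 0) :
    pvUpd a k st q = st := by
  unfold pvUpd; split_ifs with hc
  · exfalso; omega
  · rfl

theorem pvPairs_shrink (a : List Int) (k : Int)
    (hs : ∀ p q : Nat, p ≤ q → q < a.length → a.getD p 0 ≤ a.getD q 0)
    (lo hi : Nat) (hhi : hi < a.length) (hlt : lo < hi) (hk : k ≤ a.getD lo 0 + a.getD hi 0)
    (st : Int × Int × Int) :
    (pvPairs lo hi).foldl (pvUpd a k) st = (pvPairs lo (hi - 1)).foldl (pvUpd a k) st := by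
  have hdead : ∀ (i : Nat), lo ≤ i → i < a.length → ∀ st' : Int × Int × Int,
      pvUpd a k st' (i, hi) = st' := by
    intro i hli hlen st'
    refine pvUpd_dead a k st' (i, hi) (Or.inr ?_)
    have := hs lo i hli hlen
    simp only; omega
  have h1 : hi - 1 + 1 = hi := by omega
  have hsplitI : List.Ico lo hi = List.Ico lo (hi - 1) ++ [hi - 1] := by
    have h2 := List.Ico.succ_top (n := lo) (m := hi - 1) (by omega)
    rwa [h1] at h2
  rw [pvPairs, pvPairs, List.foldl_flatMap, List.foldl_flatMap, hsplitI, List.foldl_append]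
  simp only [List.foldl_cons, List.foldl_nil]
  have hrow_last : List.Ico (hi - 1 + 1) (hi + 1) = [hi] := by
    rw [h1, List.Ico.eq_cons (by omega), List.Ico.eq_nil_of_le (le_refl _)]
  rw [hrow_last]
  simp only [List.map_cons, List.map_nil, List.foldl_cons, List.foldl_nil]
  rw [hdead (hi - 1) (by omega) (by omega)]
  refine PySem.List.foldl_congr_mem _ _ _ _ ?_
  intro acc i himem
  have hmem := List.Ico.mem.mp himem
  have hrow : List.Ico (i + 1) (hi + 1) = List.Ico (i + 1) (hi - 1 + 1) ++ [hi] := by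
    rw [h1]; exact List.Ico.succ_top (by omega)
  rw [hrow, List.map_append, List.foldl_append]
  simp only [List.map_cons, List.map_nil, List.foldl_cons, List.foldl_nil]
  rw [hdead i (by omega) (by omega)]


theorem pvTP (a : List Int) (k : Int)
    (hs : ∀ p q : Nat, p ≤ q → q < a.length → a.getD p 0 ≤ a.getD q 0) :
    ∀ fuel lo hi st, hi < a.length → hi - lo < fuel →
      pvTwoPtr a k fuel (lo : Int) (hi : Int) st = (pvPairs lo hi).foldl (pvUpd a k) st := by
  intro fuel
  induction fuel with
  | zero => intro lo hi st _ hf; omega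
  | succ fuel ih =>
    intro lo hi st hhi hf
    show (if (lo : Int) < (hi : Int) then _ else st) = _
    by_cases hlt : lo < hi
    · rw [if_pos (by exact_mod_cast hlt)]
      simp only [PySem.List.pyGetD_natCast]
      by_cases hck : a.getD lo 0 + a.getD hi 0 < k
      · rw [if_pos hck]
        have hcast : (lo : Int) + 1 = ((lo + 1 : Nat) : Int) := by push_cast; ring
        rw [hcast, ih (lo + 1) hi _ hhi (by omega)]
        rw [pvPairs_cons lo hi hlt, List.foldl_append]
        rw [pvRow a k hs lo hi hhi hck (lo + 1) st (by omega) (by omega)]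
        congr 1
        simp only [pvUpd]
        by_cases hb : st.1 < a.getD lo 0 + a.getD hi 0
        · rw [if_pos hb, if_pos ⟨hb, hck⟩]
        · rw [if_neg hb, if_neg (by omega)]
      · rw [if_neg hck]
        have hcast : (hi : Int) - 1 = ((hi - 1 : Nat) : Int) := by push_cast [Nat.cast_sub (by omega : 1 ≤ hi)]; ring
        rw [hcast, ih lo (hi - 1) st (by omega) (by omega)]
        rw [pvPairs_shrink a k hs lo hi hhi hlt (by omega) st]
    · rw [if_neg (by exact_mod_cast hlt)]
      rw [pvPairs, List.Ico.eq_nil_of_le (by omega), List.flatMap_nil, List.foldl_nil]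

theorem pvCount_bounds (l : List Int) (k : Int) (hp : l.Pairwise (· ≤ ·)) :
    (∀ j, j < l.countP (fun x => decide (x < k)) → l.getD j 0 < k) ∧
    (∀ j, l.countP (fun x => decide (x < k)) ≤ j → j < l.length → k ≤ l.getD j 0) := by
  induction l with
  | nil => exact ⟨fun j h => by simp at h, fun j h hl => by simp at hl⟩
  | cons x t ih =>
    rcases List.pairwise_cons.mp hp with ⟨hx, hpt⟩
    rcases ih hpt with ⟨ih1, ih2⟩
    by_cases hxk : x < k
    · have hc : (x :: t).countP (fun x => decide (x < k)) = t.countP (fun x => decide (x < k)) + 1 :=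
        List.countP_cons_of_pos (by simpa using hxk)
      constructor
      · intro j hj
        rw [hc] at hj
        match j with
        | 0 => simpa using hxk
        | j + 1 => simpa using ih1 j (by omega)
      · intro j hj hl
        rw [hc] at hj
        match j with
        | 0 => omega
        | j + 1 => simpa using ih2 j (by omega) (by simpa using hl)
    · have hge : ∀ y ∈ x :: t, k ≤ y := by
        intro y hy
        rcases List.mem_cons.mp hy with rfl | hy
        · omega
        · exact le_trans (by omega) (hx y hy)
      have hc : (x :: t).countP (fun x => decide (x < k)) = 0 := by
        rw [List.countP_eq_zero]
        intro y hy
        simpa using not_lt.mpr (hge y hy)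
      constructor
      · intro j hj; rw [hc] at hj; omega
      · intro j _ hl
        rw [List.getD_eq_getElem _ _ hl]
        exact hge _ (List.getElem_mem _)

theorem pvFindP_spec (a : List Int) (k : Int)
    (hF1 : ∀ j, j < a.countP (fun x => decide (x < k)) → a.getD j 0 < k)
    (hF2 : ∀ j, a.countP (fun x => decide (x < k)) ≤ j → j < a.length → k ≤ a.getD j 0) :
    ∀ rem i, rem = a.length - i → i ≤ a.countP (fun x => decide (x < k)) →
      pvFindP a k rem i =
        if a.countP (fun x => decide (x < k)) < a.length then a.countP (fun x => decide (x < k)) else 0 := by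
  have hcle : a.countP (fun x => decide (x < k)) ≤ a.length := List.countP_le_length
  intro rem
  induction rem with
  | zero =>
    intro i h0 hic
    have : ¬ a.countP (fun x => decide (x < k)) < a.length := by omega
    rw [if_neg this]; rfl
  | succ rem ih =>
    intro i h0 hic
    have hil : i < a.length := by omega
    show (if k ≤ a.getD i 0 then i else pvFindP a k rem (i + 1)) = _
    by_cases hki : k ≤ a.getD i 0
    · have hie : i = a.countP (fun x => decide (x < k)) := by
        rcases Nat.lt_or_ge i (a.countP (fun x => decide (x < k))) with hlt | hge
        · exact absurd (hF1 i hlt) (by omega)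
        · omega
      rw [if_pos hki, if_pos (by omega), hie]
    · have hlt : i < a.countP (fun x => decide (x < k)) := by
        rcases Nat.lt_or_ge i (a.countP (fun x => decide (x < k))) with hlt | hge
        · exact hlt
        · exact absurd (hF2 i hge hil) hki
      rw [if_neg hki]
      exact ih (i + 1) (by omega) (by omega)

theorem pvPositions_pair (l : List Int) : ∀ (i j : Nat), i < j → j < l.length →
    l.getD i 0 ∈ l ∧ l.getD j 0 ∈ l.erase (l.getD i 0) := by
  induction l with
  | nil => intro i j hij hj; simp at hj
  | cons x t ih =>
    intro i j hij hj
    match j with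
    | j + 1 =>
      match i with
      | 0 =>
        refine ⟨by simp, ?_⟩
        rw [List.getD_cons_zero, List.erase_cons_head, List.getD_cons_succ,
          List.getD_eq_getElem _ _ (by simpa using hj)]
        exact List.getElem_mem _
      | i + 1 =>
        have hrec := ih i j (by omega) (by simpa using hj)
        refine ⟨by simp; exact Or.inr hrec.1, ?_⟩
        rw [List.getD_cons_succ, List.getD_cons_succ, List.erase_cons]
        split_ifs with hbe
        · rw [List.getD_eq_getElem _ _ (by simpa using hj)]
          exact List.getElem_mem _
        · exact List.mem_cons_of_mem _ hrec.2

theorem pvPair_positions (l : List Int) (x y : Int) : x ∈ l → y ∈ l.erase x →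
    ∃ i j, i < j ∧ j < l.length ∧
      ((l.getD i 0 = x ∧ l.getD j 0 = y) ∨ (l.getD i 0 = y ∧ l.getD j 0 = x)) := by
  induction l with
  | nil => intro hx; simp at hx
  | cons z t ih =>
    intro hx hy
    by_cases hzx : z = x
    · subst hzx
      rw [List.erase_cons_head] at hy
      obtain ⟨j', hj', hyj⟩ := List.mem_iff_getElem.mp hy
      refine ⟨0, j' + 1, by omega, by simpa using hj', Or.inl ⟨List.getD_cons_zero, ?_⟩⟩
      rw [List.getD_cons_succ, List.getD_eq_getElem _ _ hj', hyj]
    · rw [List.erase_cons_tail (by simpa using hzx)] at hy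
      have hxt : x ∈ t := by
        rcases List.mem_cons.mp hx with rfl | h
        · exact absurd rfl hzx
        · exact h
      rcases List.mem_cons.mp hy with rfl | hyt
      · obtain ⟨j', hj', hyj⟩ := List.mem_iff_getElem.mp hxt
        refine ⟨0, j' + 1, by omega, by simpa using hj', Or.inr ⟨List.getD_cons_zero, ?_⟩⟩
        rw [List.getD_cons_succ, List.getD_eq_getElem _ _ hj', hyj]
      · obtain ⟨i, j, hij, hjl, hcase⟩ := ih hxt hyt
        refine ⟨i + 1, j + 1, by omega, by simpa using hjl, ?_⟩
        simpa [List.getD_cons_succ] using hcase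

-- A's nested loops are the fold of pvUpd over the lexicographic pair list
theorem pvA_as_fold (nums : List Int) (k : Int) :
    sum_less_than_k nums k =
      (let a := PySem.List.sorted nums (fun x => x) false
       let p := pvFindP a k a.length 0
       let st := ((List.range p).flatMap fun i => (List.Ico (i + 1) p).map fun j => (i, j)).foldl
         (pvUpd a k) ((0 : Int), (0 : Int), (0 : Int))
       [st.2.1, st.2.2]) := by
  simp only [sum_less_than_k, List.foldl_flatMap, List.foldl_map, pvUpd]

-- B's count loop is countP
theorem pvB_as_fold (nums : List Int) (k : Int) :
    sum_less_than_k_alt nums k =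
      (let a := PySem.List.sorted nums (fun x => x) false
       let st := pvTwoPtr a k (a.length + 1) 0
         ((a.countP (fun x => decide (x < k)) : Int) - 1) ((0 : Int), (0 : Int), (0 : Int))
       [st.2.1, st.2.2]) := by
  simp only [sum_less_than_k_alt]
  rw [PySem.List.foldl_ite_add_one (p := fun v => v < k)]
  norm_num

-- the lexicographic pair list over range p is pvPairs 0 (p - 1)
theorem pvLex_eq (p : Nat) (hp : 1 ≤ p) :
    ((List.range p).flatMap fun i => (List.Ico (i + 1) p).map fun j => (i, j)) = pvPairs 0 (p - 1) := by
  have h1 : p - 1 + 1 = p := by omega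
  rw [pvPairs, h1, ← List.Ico.zero_bot p]
  have h2 := List.Ico.succ_top (n := 0) (m := p - 1) (Nat.zero_le _)
  rw [h1] at h2
  rw [h2, List.flatMap_append]
  have h3 : List.Ico (p - 1 + 1) p = [] := List.Ico.eq_nil_of_le (by omega)
  simp [h3]

theorem pvSorted_mono (nums : List Int) :
    ∀ p q : Nat, p ≤ q → q < (PySem.List.sorted nums (fun x => x) false).length →
      (PySem.List.sorted nums (fun x => x) false).getD p 0 ≤ (PySem.List.sorted nums (fun x => x) false).getD q 0 := by
  intro p q hpq hq
  rw [List.getD_eq_getElem _ _ (lt_of_le_of_lt hpq hq), List.getD_eq_getElem _ _ hq]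
  exact PySem.List.sorted_id_getElem_mono nums hpq hq

-- ===== VERDICT (by name: the statement is the Claim_ definition above) =====
theorem sum_less_than_k_spec : Claim_unchanged_sum_less_than_k := by
  intro nums k _ hnd
  rw [pvA_as_fold, pvB_as_fold]
  simp only
  set a := PySem.List.sorted nums (fun x => x) false with ha
  set c := a.countP (fun x => decide (x < k)) with hc
  have hperm : a.Perm nums := PySem.List.sorted_perm nums (fun x => x) false
  have hs := pvSorted_mono nums
  rw [← ha] at hs
  have hcb := pvCount_bounds a k (by
    have := PySem.List.sorted_pairwise (xs := nums) (key := fun x => x)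
    simpa using this)
  have hcle : c ≤ a.length := List.countP_le_length
  have hfp := pvFindP_spec a k hcb.1 hcb.2 a.length 0 (by omega) (by omega)
  rw [← hc] at hfp
  by_cases hc0 : c = 0
  · -- both loops see nothing
    have hA : pvFindP a k a.length 0 = 0 := by
      rw [hfp, hc0]; split_ifs <;> rfl
    rw [hA]
    have hB : pvTwoPtr a k (a.length + 1) 0 ((c : Int) - 1) ((0:Int),(0:Int),(0:Int)) = ((0:Int),(0:Int),(0:Int)) := by
      show (if (0 : Int) < (c : Int) - 1 then _ else _) = _
      rw [if_neg (by omega)]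
    rw [hB]
    simp
  · have hc1 : 1 ≤ c := by omega
    have hcast : (c : Int) - 1 = ((c - 1 : Nat) : Int) := by push_cast [Nat.cast_sub hc1]; ring
    have hB : pvTwoPtr a k (a.length + 1) 0 ((c : Int) - 1) ((0:Int),(0:Int),(0:Int))
        = (pvPairs 0 (c - 1)).foldl (pvUpd a k) ((0:Int),(0:Int),(0:Int)) := by
      rw [hcast]
      have h0 : ((0 : Nat) : Int) = (0 : Int) := by norm_num
      rw [← h0]
      exact pvTP a k hs (a.length + 1) 0 (c - 1) _ (by omega) (by omega)
    rw [hB]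
    by_cases hcn : c < a.length
    · have hA : pvFindP a k a.length 0 = c := by rw [hfp, if_pos hcn]
      rw [hA, pvLex_eq c hc1]
    · -- every element is < k; ¬D_ means there is no valid pair, so both sides are the start state
      have hceq : c = a.length := by omega
      have hall : ∀ x ∈ nums, x < k := by
        intro x hx
        have hxa : x ∈ a := hperm.mem_iff.mpr hx
        have := List.countP_eq_length.mp (by rw [← hc, hceq])
        simpa using this x hxa
      have hnopair : ∀ x ∈ nums, ∀ y ∈ nums.erase x, ¬(0 < x + y ∧ x + y < k) := by
        intro x hx y hy hcon
        exact hnd ⟨hall, x, hx, y, hy, hcon⟩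
      have hA : pvFindP a k a.length 0 = 0 := by
        rw [hfp, if_neg hcn]
      rw [hA]
      have hdead : (pvPairs 0 (c - 1)).foldl (pvUpd a k) ((0:Int),(0:Int),(0:Int)) = ((0:Int),(0:Int),(0:Int)) := by
        refine pvFold_dead a k _ _ (by norm_num) ?_
        intro q hq
        obtain ⟨i, hiI, hqrow⟩ := List.mem_flatMap.mp hq
        obtain ⟨j, hjI, rfl⟩ := List.mem_map.mp hqrow
        have hiI' := List.Ico.mem.mp hiI
        have hjI' := List.Ico.mem.mp hjI
        have hij : i < j := by omega
        have hjn : j < a.length := by omega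
        obtain ⟨hxa, hya⟩ := pvPositions_pair a i j hij hjn
        have hxnums : a.getD i 0 ∈ nums := hperm.mem_iff.mp hxa
        have hynums : a.getD j 0 ∈ nums.erase (a.getD i 0) := (hperm.erase _).mem_iff.mp hya
        have := hnopair _ hxnums _ hynums
        simp only
        omega
      rw [hdead]
      simp

theorem sum_less_than_k_changed : Claim_changed_sum_less_than_k := by
  unfold Claim_changed_sum_less_than_k; decide

theorem sum_less_than_k_tight : Claim_exact_sum_less_than_k := by
  intro nums k _ hd
  obtain ⟨hall, x, hx, y, hy, hxy1, hxy2⟩ := hd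
  rw [pvA_as_fold, pvB_as_fold]
  simp only
  set a := PySem.List.sorted nums (fun x => x) false with ha
  set c := a.countP (fun x => decide (x < k)) with hc
  have hperm : a.Perm nums := PySem.List.sorted_perm nums (fun x => x) false
  have hs := pvSorted_mono nums
  rw [← ha] at hs
  have hcb := pvCount_bounds a k (by
    have := PySem.List.sorted_pairwise (xs := nums) (key := fun x => x)
    simpa using this)
  have hceq : c = a.length := by
    rw [hc]
    refine List.countP_eq_length.mpr ?_
    intro z hz
    simpa using hall z (hperm.mem_iff.mp hz)
  -- positions of the witness pair in the sorted list
  have hxa : x ∈ a := hperm.mem_iff.mpr hx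
  have hya : y ∈ a.erase x := (hperm.erase _).mem_iff.mpr hy
  obtain ⟨i, j, hij, hjn, hcase⟩ := pvPair_positions a x y hxa hya
  have hsum : a.getD i 0 + a.getD j 0 = x + y := by rcases hcase with ⟨e1, e2⟩ | ⟨e1, e2⟩ <;> omega
  have hn1 : 1 ≤ a.length := by omega
  have hfp := pvFindP_spec a k hcb.1 hcb.2 a.length 0 (by omega) (by omega)
  rw [← hc] at hfp
  have hA : pvFindP a k a.length 0 = 0 := by rw [hfp, if_neg (by omega)]
  rw [hA]
  have hcast : (c : Int) - 1 = ((c - 1 : Nat) : Int) := by push_cast [Nat.cast_sub (by omega : 1 ≤ c)]; ring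
  have hB : pvTwoPtr a k (a.length + 1) 0 ((c : Int) - 1) ((0:Int),(0:Int),(0:Int))
      = (pvPairs 0 (c - 1)).foldl (pvUpd a k) ((0:Int),(0:Int),(0:Int)) := by
    rw [hcast]
    have h0 : ((0 : Nat) : Int) = (0 : Int) := by norm_num
    rw [← h0]
    exact pvTP a k hs (a.length + 1) 0 (c - 1) _ (by omega) (by omega)
  rw [hB]
  have hqmem : (i, j) ∈ pvPairs 0 (c - 1) := by
    refine List.mem_flatMap.mpr ⟨i, List.Ico.mem.mpr ⟨Nat.zero_le _, by omega⟩, ?_⟩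
    refine List.mem_map.mpr ⟨j, List.Ico.mem.mpr ⟨by omega, by omega⟩, rfl⟩
  have hpos := pvFold_pos a k (pvPairs 0 (c - 1)) ((0:Int),(0:Int),(0:Int)) (i, j) hqmem
    (by norm_num) (by simp only; omega) (by simp only; omega)
  have hsumeq := pvFold_sum_eq a k (pvPairs 0 (c - 1)) ((0:Int),(0:Int),(0:Int)) (by norm_num)
  intro hcontra
  simp only [List.range_zero, List.flatMap_nil, List.foldl_nil, List.cons.injEq] at hcontra
  obtain ⟨e1, e2, -⟩ := hcontra
  rw [← e1, ← e2] at hsumeq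
  omega
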